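-- pv_equiv track=rewrite | github.com/juditacs/snippets | deep_learning/bert_vocab_stats/compute_bert_tokenizer_stats.py | get_real_tokens
-- ===== SOURCE A (Python) =====
-- def get_real_tokens(sentence):
--     real = []
--     idx = 0
--     while idx < len(sentence):
--         id_ = sentence[idx].split("\t")[0]
--         real.append(sentence[idx])
--         if '-' in id_:
--             src, tgt = id_.split('-')
--             diff = int(tgt) - int(src) + 1
--             idx += diff
--         else:
--             idx += 1
--     return real
-- ===== SOURCE B (Python) =====
-- def get_real_tokens(sentence):
--     it = iter(sentence)
--     real = []
--     for tok in it:
--         real.append(tok)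
--         id_ = tok.split("\t")[0]
--         if '-' in id_:
--             src, tgt = id_.split('-')
--             for _ in range(int(tgt) - int(src)):
--                 next(it, None)
--     return real
-- ===== Notes on version B (the rewrite author's own statement) =====
-- stated objective: idiomatic
-- what changed: Replaces A's while-loop over an integer index with explicit jump arithmetic (idx += tgt-src+1) by the idiomatic Python pattern of a single shared iterator: a for-loop over iter(sentence) that, after a hyphenated range id, consumes the component rows directly from the iterator with next(), so no index, no len() and no counter state exist at all.
-- outside the precondition, e.g. on get_real_tokens(['1-2\ta', 'x-\tb', 'z']): A returns ['1-2\ta', 'z'], B returns ['1-2\ta', 'z']; on get_real_tokens(['1-2\ta', '3-1\tb', 'z']): A returns ['1-2\ta', 'z'], B returns ['1-2\ta', 'z']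
import Mathlib
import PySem

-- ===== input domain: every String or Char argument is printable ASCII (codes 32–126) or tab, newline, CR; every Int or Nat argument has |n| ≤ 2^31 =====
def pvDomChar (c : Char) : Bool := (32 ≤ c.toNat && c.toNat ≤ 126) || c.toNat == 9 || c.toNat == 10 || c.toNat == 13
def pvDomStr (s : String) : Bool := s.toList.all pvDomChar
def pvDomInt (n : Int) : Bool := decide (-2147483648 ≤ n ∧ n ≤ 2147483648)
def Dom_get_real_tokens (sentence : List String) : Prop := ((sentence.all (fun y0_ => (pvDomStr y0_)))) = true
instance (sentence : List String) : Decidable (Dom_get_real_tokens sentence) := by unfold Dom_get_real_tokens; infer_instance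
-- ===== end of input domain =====

-- B replaces A's index-jumping while-loop by one for-loop over a shared iterator that
-- consumes component rows with next() (objective: idiomatic); equivalent on Pre_ (see its comment).


-- ===== PORT A =====
-- while-loop with index jumps; fuel = sentence.length suffices on Pre_ inputs (idx grows by ≥ 1 each step)
def goA (sentence : List String) : Nat → Int → List String → List String
  | 0, _, real => real
  | f + 1, idx, real =>
    if idx < (sentence.length : Int) then
      match PySem.List.pyGet? sentence idx with
      | none => real            -- IndexError (unreachable inside Pre_)
      | some tok =>
        let id_ := (PySem.Chars.splitOn tok.toList ['\t']).headD []
        let real' := real ++ [tok]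
        if PySem.Chars.isIn ['-'] id_ then
          match PySem.Chars.splitOn id_ ['-'] with
          | [src, tgt] =>
            match PySem.Int.ofChars? src, PySem.Int.ofChars? tgt with
            | some s, some t => goA sentence f (idx + (t - s + 1)) real'
            | _, _ => real'     -- ValueError from int() (outside Pre_)
          | _ => real'          -- unpack ValueError (outside Pre_)
        else goA sentence f (idx + 1) real'
    else real

def get_real_tokens (sentence : List String) : List String :=
  goA sentence sentence.length 0 []

-- ===== PORT B =====
-- for-loop over a shared iterator; after a range id the inner 'for _ in range(t-s): next(it)'
-- consumes that many elements, i.e. the recursion continues on rest.drop (t-s).toNat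
-- (range of a non-positive number is empty, exactly Int.toNat's clamping)
def goB : List String → List String
  | [] => []
  | tok :: rest =>
    let id_ := (PySem.Chars.splitOn tok.toList ['\t']).headD []
    if PySem.Chars.isIn ['-'] id_ then
      match PySem.Chars.splitOn id_ ['-'] with
      | [src, tgt] =>
        match PySem.Int.ofChars? src, PySem.Int.ofChars? tgt with
        | some s, some t => tok :: goB (rest.drop (t - s).toNat)
        | _, _ => [tok]         -- ValueError from int() (outside Pre_)
      | _ => [tok]              -- unpack ValueError (outside Pre_)
    else tok :: goB rest
termination_by l => l.length
decreasing_by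
  · simp [List.length_drop]
  · simp

def get_real_tokens_alt (sentence : List String) : List String :=
  goB sentence

-- ===== PRECONDITION & SPEC =====
def tokOK (tok : String) : Bool :=
  let id_ := (PySem.Chars.splitOn tok.toList ['\t']).headD []
  if PySem.Chars.isIn ['-'] id_ then
    match PySem.Chars.splitOn id_ ['-'] with
    | [src, tgt] =>
      match PySem.Int.ofChars? src, PySem.Int.ofChars? tgt with
      | some s, some t => decide (s ≤ t)
      | _, _ => false
    | _ => false
  else true

-- Pre_ requires EVERY token whose first tab-field contains '-' to split into exactly two
-- valid ints src ≤ tgt: on tokens A actually visits this is exactly where A raises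
-- (ValueError) or loops forever (tgt < src); it also excludes such malformed tokens sitting
-- at a skipped position, where A returns normally (B returns the same value there).
def Pre_get_real_tokens (sentence : List String) : Prop :=
  sentence.all tokOK = true
instance (sentence : List String) : Decidable (Pre_get_real_tokens sentence) := by
  unfold Pre_get_real_tokens; infer_instance

def pvWitness_get_real_tokens : List String := ["1-2\ta", "1\tb", "2\tc", "3\td"]

def Spec_get_real_tokens (sentence : List String) (out : List String) : Prop := out = get_real_tokens_alt sentence
instance (sentence : List String) (out : List String) : Decidable (Spec_get_real_tokens sentence out) := by unfold Spec_get_real_tokens; infer_instance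

-- ===== CLAIM (what is proved, stated in full; the proofs are below) =====
def Claim_equal_get_real_tokens : Prop := ∀ (sentence : List String), Dom_get_real_tokens sentence → Pre_get_real_tokens sentence → Spec_get_real_tokens sentence (get_real_tokens sentence)

-- ===== LEMMAS AND PROOFS =====

lemma goA_eq_goB (sentence : List String) (hpre : sentence.all tokOK = true) :
    ∀ (fuel idx : Nat) (real : List String), sentence.length ≤ fuel + idx →
      goA sentence fuel (idx : Int) real = real ++ goB (sentence.drop idx) := by
  intro fuel
  induction fuel with
  | zero =>
    intro idx real hlen
    have hd : sentence.drop idx = [] := List.drop_eq_nil_of_le (by omega)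
    rw [hd]
    show real = real ++ goB []
    rw [goB, List.append_nil]
  | succ f ih =>
    intro idx real hlen
    by_cases hlt : idx < sentence.length
    · have hget : PySem.List.pyGet? sentence (idx : Int) = some sentence[idx] := by
        simp [PySem.List.pyGet?_natCast, List.getElem?_eq_getElem hlt]
      have hdrop : sentence.drop idx = sentence[idx] :: sentence.drop (idx + 1) :=
        (List.getElem_cons_drop hlt).symm
      have hmem : sentence[idx] ∈ sentence := List.getElem_mem hlt
      have htok : tokOK sentence[idx] = true := by
        rw [List.all_eq_true] at hpre; exact hpre _ hmem
      rw [goA, if_pos (by exact_mod_cast hlt), hget, hdrop]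
      set tok := sentence[idx] with htokdef
      unfold tokOK at htok
      rw [goB]
      simp only at htok ⊢
      by_cases hdash : PySem.Chars.isIn ['-'] ((PySem.Chars.splitOn tok.toList ['\t']).headD []) = true
      · rw [if_pos hdash]; rw [if_pos hdash] at htok
        rcases hsp : PySem.Chars.splitOn ((PySem.Chars.splitOn tok.toList ['\t']).headD []) ['-'] with _ | ⟨src, _ | ⟨tgt, _ | _⟩⟩ <;>
          rw [hsp] at htok <;> try simp at htok
        rcases hsrc : PySem.Int.ofChars? src with _ | s <;> rw [hsrc] at htok <;> try simp at htok
        rcases htgt : PySem.Int.ofChars? tgt with _ | t <;> rw [htgt] at htok <;> try simp at htok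
        have hst : s ≤ t := htok
        simp only [hsrc, htgt]
        have hcast : (idx : Int) + (t - s + 1) = ((idx + 1 + (t - s).toNat : Nat) : Int) := by
          push_cast; omega
        rw [if_pos hdash]
        rw [hcast, ih _ _ (by omega)]
        rw [← List.drop_drop, List.append_assoc, List.singleton_append]
      · rw [if_neg hdash]; rw [if_neg hdash]
        have hcast : (idx : Int) + 1 = ((idx + 1 : Nat) : Int) := by push_cast; ring
        rw [hcast, ih _ _ (by omega), List.append_assoc, List.singleton_append]
    · rw [goA, if_neg (by exact_mod_cast hlt)]
      have hd : sentence.drop idx = [] := List.drop_eq_nil_of_le (by omega)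
      rw [hd]
      show real = real ++ goB []
      rw [goB, List.append_nil]

-- ===== VERDICT (by name: the statement is the Claim_ definition above) =====
theorem get_real_tokens_spec : Claim_equal_get_real_tokens := by
  intro sentence _ hpre
  unfold Spec_get_real_tokens get_real_tokens get_real_tokens_alt
  have := goA_eq_goB sentence hpre sentence.length 0 [] (by omega)
  simpa using this
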